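-- pv_equiv track=rewrite | github.com/EfazAhmed/CodeSignal-Arcade | Intro/10_Eruption_of_Light/43_is_beautiful_string.py | solution
-- ===== SOURCE A (Python) =====
-- def solution(inputString):
--     li = sorted([x for x in inputString])
--     freq = {}
--
--     alpha = "abcdefghijklmnopqrstuvwxyz"
--
--
--     for letter in alpha:
--         if letter in li:
--             count = li.count(letter)
--             freq[letter] = count
--         else:
--             freq[letter] = 0
--
--
--     values = list(freq.values())
--     return values == sorted(values, reverse=True)
-- ===== SOURCE B (Python) =====
-- def solution(inputString):
--     # Shape check on the sorted lowercase letters: the runs must use consecutive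
--     # letters starting at 'a', with non-increasing run lengths.  This is exactly
--     # "letter frequencies non-increasing from 'a' to 'z'": letters with positive
--     # count must form a contiguous alphabet prefix and their counts must not grow.
--     letters = sorted(c for c in inputString if 'a' <= c <= 'z')
--     expected = 'a'
--     prev = None
--     i = 0
--     n = len(letters)
--     while i < n:
--         c = letters[i]
--         j = i
--         while j < n and letters[j] == c:
--             j += 1
--         if c != expected or (prev is not None and j - i > prev):
--             return False
--         prev = j - i
--         expected = chr(ord(expected) + 1)
--         i = j
--     return True
-- ===== Notes on version B (the rewrite author's own statement) =====
-- stated objective: alternative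
-- what changed: Instead of building a per-letter frequency table and comparing it against a sorted-descending copy, B sorts the lowercase letters and verifies the shape of that sorted list directly: its runs must use consecutive letters with non-increasing run lengths, starting at the first letter of the alphabet, with early exit on the first violation; there is no frequency table, no per-letter membership/count scans and no comparison of count sequences.
import Mathlib
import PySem

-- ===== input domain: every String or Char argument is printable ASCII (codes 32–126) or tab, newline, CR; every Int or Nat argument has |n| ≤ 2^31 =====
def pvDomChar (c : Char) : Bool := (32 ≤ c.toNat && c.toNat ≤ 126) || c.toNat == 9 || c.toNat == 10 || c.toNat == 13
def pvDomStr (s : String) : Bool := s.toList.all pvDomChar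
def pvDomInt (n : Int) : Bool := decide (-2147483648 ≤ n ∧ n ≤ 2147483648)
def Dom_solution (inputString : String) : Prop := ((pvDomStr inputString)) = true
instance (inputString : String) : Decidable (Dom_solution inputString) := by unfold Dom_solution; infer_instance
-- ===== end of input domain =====

-- B drops A's frequency table and sorted-descending comparison: it sorts the lowercase letters
-- and checks the shape of that list directly (runs of consecutive letters from 'a' with
-- non-increasing run lengths), with early exit.

-- ===== PORT A =====
def solution (inputString : String) : Bool :=
  let li := PySem.List.sorted (inputString.toList) (fun x => x) false
  let freq := ("abcdefghijklmnopqrstuvwxyz".toList).foldl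
      (fun (d : PySem.Dict Char Int) letter =>
        if letter ∈ li then d.insert letter ((li.count letter : Int))
        else d.insert letter 0)
      PySem.Dict.empty
  let values := freq.values
  values == PySem.List.sorted values (fun x => x) true

-- ===== PORT B =====
-- the two nested while loops of Source B: outer loop = recursion on the remaining list,
-- inner run-extraction loop = takeWhile/dropWhile on the current head's run
def solutionAltScan (t : List Char) (expected : Char) (prev : Option Nat) : Bool :=
  match t with
  | [] => true
  | c :: tl =>
    let run := ((c :: tl).takeWhile (fun x => x == c)).length
    let rest := (c :: tl).dropWhile (fun x => x == c)
    if (!(c == expected)) || (match prev with | some p => decide (p < run) | none => false)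
    then false
    else solutionAltScan rest (Char.ofNat (expected.toNat + 1)) (some run)
termination_by t.length
decreasing_by
  simp only [List.dropWhile_cons, beq_self_eq_true, if_true]
  exact Nat.lt_succ_of_le (List.length_dropWhile_le _ _)

def solution_alt (inputString : String) : Bool :=
  let letters := PySem.List.sorted
      (inputString.toList.filter (fun c => decide ('a' ≤ c ∧ c ≤ 'z'))) (fun x => x) false
  solutionAltScan letters 'a' none

-- ===== PRECONDITION & SPEC =====
def Spec_solution (inputString : String) (out : Bool) : Prop := out = solution_alt inputString
instance (inputString : String) (out : Bool) : Decidable (Spec_solution inputString out) := by unfold Spec_solution; infer_instance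

-- ===== CLAIM (what is proved, stated in full; the proofs are below) =====
def Claim_equal_solution : Prop := ∀ (inputString : String), Dom_solution inputString → Spec_solution inputString (solution inputString)

-- ===== LEMMAS AND PROOFS =====

-- proof-side helpers
def canon : Char → List Nat → List Char
  | _, [] => []
  | e, c :: cs => List.replicate c e ++ canon (Char.ofNat (e.toNat + 1)) cs

def NonInc : List Nat → Option Nat → Prop
  | [], _ => True
  | c :: cs, p => (match p with | none => True | some q => c ≤ q) ∧ NonInc cs (some c)

def cl (l : List Char) : List Nat := (List.range 26).map (fun i => l.count (Char.ofNat (97 + i)))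

theorem char_toNat_ofNat (n : Nat) (h : n < 55296) : (Char.ofNat n).toNat = n := by
  unfold Char.ofNat
  rw [dif_pos (Or.inl h)]
  simp [Char.ofNatAux, Char.toNat]

theorem char_eq_of_toNat_eq (x y : Char) (h : x.toNat = y.toNat) : x = y := by
  have := Char.ofNat_toNat x
  rw [h, Char.ofNat_toNat] at this
  exact this.symm

theorem char_le_iff (a b : Char) : a ≤ b ↔ a.toNat ≤ b.toNat := by
  rw [Char.le_def, UInt32.le_iff_toNat_le]; rfl

theorem mem_canon (x : Char) : ∀ (cs : List Nat) (e : Char), e.toNat + cs.length ≤ 123 →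
    x ∈ canon e cs → e.toNat ≤ x.toNat ∧ x.toNat < e.toNat + cs.length := by
  intro cs
  induction cs with
  | nil => intro e _ hmem; simp [canon] at hmem
  | cons c cs' ih =>
    intro e hb hmem
    simp only [canon, List.mem_append, List.mem_replicate] at hmem
    have he' : (Char.ofNat (e.toNat + 1)).toNat = e.toNat + 1 :=
      char_toNat_ofNat _ (by simp at hb; omega)
    rcases hmem with ⟨_, rfl⟩ | hmem
    · simp only [List.length_cons]; omega
    · have := ih (Char.ofNat (e.toNat + 1)) (by rw [he']; simp at hb ⊢; omega) hmem
      rw [he'] at this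
      simp only [List.length_cons]; omega

theorem canon_nil_iff : ∀ (cs : List Nat) (e : Char), (canon e cs = [] ↔ ∀ c ∈ cs, c = 0) := by
  intro cs
  induction cs with
  | nil => intro e; simp [canon]
  | cons c cs' ih =>
    intro e
    simp [canon, List.append_eq_nil_iff, List.replicate_eq_nil_iff, ih]

theorem NonInc_zero : ∀ (cs : List Nat), (NonInc cs (some 0) ↔ ∀ c ∈ cs, c = 0) := by
  intro cs
  induction cs with
  | nil => simp [NonInc]
  | cons c cs' ih =>
    simp only [NonInc, List.mem_cons]
    constructor
    · rintro ⟨h0, hrest⟩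
      have hc : c = 0 := Nat.le_zero.mp h0
      subst hc
      intro d hd
      rcases hd with rfl | hd
      · rfl
      · exact (ih.mp hrest) d hd
    · intro h
      have hc : c = 0 := h c (Or.inl rfl)
      subst hc
      exact ⟨Nat.le_refl 0, ih.mpr (fun d hd => h d (Or.inr hd))⟩

theorem pairwise_canon : ∀ (cs : List Nat) (e : Char), e.toNat + cs.length ≤ 123 →
    (canon e cs).Pairwise (· ≤ ·) := by
  intro cs
  induction cs with
  | nil => intro e _; simp [canon]
  | cons c cs' ih =>
    intro e hb
    have he' : (Char.ofNat (e.toNat + 1)).toNat = e.toNat + 1 :=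
      char_toNat_ofNat _ (by simp at hb; omega)
    rw [canon, List.pairwise_append]
    refine ⟨List.pairwise_replicate.mpr (Or.inr (le_refl e)), ?_, ?_⟩
    · exact ih _ (by rw [he']; simp at hb ⊢; omega)
    · intro a ha b hb'
      have hae : a = e := (List.mem_replicate.mp ha).2
      have := mem_canon b cs' (Char.ofNat (e.toNat + 1)) (by rw [he']; simp at hb ⊢; omega) hb'
      rw [he'] at this
      rw [hae, char_le_iff]
      omega

theorem count_canon (x : Char) : ∀ (cs : List Nat) (e : Char), 97 ≤ e.toNat →
    e.toNat + cs.length ≤ 123 →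
    (canon e cs).count x =
      if e.toNat ≤ x.toNat ∧ x.toNat < e.toNat + cs.length
      then cs.getD (x.toNat - e.toNat) 0 else 0 := by
  intro cs
  induction cs with
  | nil => intro e _ _; simp [canon]
  | cons c cs' ih =>
    intro e h97 hb
    have he' : (Char.ofNat (e.toNat + 1)).toNat = e.toNat + 1 :=
      char_toNat_ofNat _ (by simp at hb; omega)
    rw [canon, List.count_append, List.count_replicate]
    rw [ih (Char.ofNat (e.toNat + 1)) (by omega) (by rw [he']; simp at hb ⊢; omega)]
    rw [he']
    by_cases hxe : x = e
    · subst hxe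
      simp only [beq_self_eq_true, if_true]
      rw [if_neg (by omega), if_pos (by simp only [List.length_cons]; omega)]
      simp
    · have hne : x.toNat ≠ e.toNat := fun h => hxe (char_eq_of_toNat_eq x e h)
      rw [if_neg (by intro h; exact hxe (beq_iff_eq.mp h).symm)]
      by_cases hin : e.toNat + 1 ≤ x.toNat ∧ x.toNat < e.toNat + 1 + cs'.length
      · rw [if_pos hin, if_pos (by simp only [List.length_cons]; omega)]
        rw [show x.toNat - e.toNat = (x.toNat - (e.toNat + 1)) + 1 by omega]
        simp
      · rw [if_neg hin, if_neg (by simp only [List.length_cons]; omega)]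

theorem scan_canon : ∀ (cs : List Nat) (e : Char) (p : Option Nat), 97 ≤ e.toNat →
    e.toNat + cs.length ≤ 123 →
    (solutionAltScan (canon e cs) e p = true ↔ NonInc cs p) := by
  intro cs
  induction cs with
  | nil =>
    intro e p _ _
    rw [show canon e [] = [] from rfl, solutionAltScan.eq_def]
    simp [NonInc]
  | cons c cs' ih =>
    intro e p h97 hb
    have hblen : e.toNat + (cs'.length + 1) ≤ 123 := by simpa using hb
    have he' : (Char.ofNat (e.toNat + 1)).toNat = e.toNat + 1 :=
      char_toNat_ofNat _ (by omega)
    have hb' : (Char.ofNat (e.toNat + 1)).toNat + cs'.length ≤ 123 := by omega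
    have h97' : 97 ≤ (Char.ofNat (e.toNat + 1)).toNat := by omega
    have hne_mem : ∀ d ∈ canon (Char.ofNat (e.toNat + 1)) cs', (d == e) = false := by
      intro d hd
      have := mem_canon d cs' (Char.ofNat (e.toNat + 1)) hb' hd
      rw [he'] at this
      simp only [beq_eq_false_iff_ne, ne_eq]
      intro hde
      have : d.toNat = e.toNat := by rw [hde]
      omega
    have htw : (canon (Char.ofNat (e.toNat + 1)) cs').takeWhile (fun x => x == e) = [] := by
      cases hc : canon (Char.ofNat (e.toNat + 1)) cs' with
      | nil => rfl
      | cons d r =>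
        have hd := hne_mem d (by rw [hc]; simp)
        simp [hd]
    have hdw : (canon (Char.ofNat (e.toNat + 1)) cs').dropWhile (fun x => x == e)
        = canon (Char.ofNat (e.toNat + 1)) cs' := by
      cases hc : canon (Char.ofNat (e.toNat + 1)) cs' with
      | nil => rfl
      | cons d r =>
        have hd := hne_mem d (by rw [hc]; simp)
        simp [hd]
    rcases Nat.eq_zero_or_pos c with hc0 | hcpos
    · subst hc0
      rw [show canon e (0 :: cs') = canon (Char.ofNat (e.toNat + 1)) cs' from by
        simp [canon]]
      cases hnil : canon (Char.ofNat (e.toNat + 1)) cs' with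
      | nil =>
        rw [solutionAltScan.eq_def]
        have hall : ∀ d ∈ cs', d = 0 := (canon_nil_iff cs' _).mp hnil
        simp only [NonInc]
        constructor
        · intro _
          exact ⟨by cases p <;> simp, (NonInc_zero cs').mpr hall⟩
        · intro _; trivial
      | cons d r =>
        have hd := hne_mem d (by rw [hnil]; simp)
        rw [solutionAltScan.eq_def]
        simp only [hd, Bool.not_false, Bool.true_or, if_true]
        simp only [NonInc, Bool.false_eq_true, false_iff]
        rintro ⟨-, h2⟩
        have hall := (NonInc_zero cs').mp h2
        rw [(canon_nil_iff cs' _).mpr hall] at hnil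
        exact absurd hnil (by simp)
    · have hcanon : canon e (c :: cs') =
          e :: (List.replicate (c - 1) e ++ canon (Char.ofNat (e.toNat + 1)) cs') := by
        rw [canon, show List.replicate c e = e :: List.replicate (c - 1) e from by
          conv_lhs => rw [show c = (c - 1) + 1 by omega]
          rw [List.replicate_succ]]
        rfl
      have hrepl : ∀ x ∈ List.replicate (c - 1) e, (fun x => x == e) x = true := by
        intro x hx
        rw [(List.mem_replicate.mp hx).2]
        simp
      have htake : ((e :: (List.replicate (c - 1) e ++ canon (Char.ofNat (e.toNat + 1)) cs')).takeWhile
          (fun x => x == e)).length = c := by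
        rw [List.takeWhile_cons, if_pos (by simp), List.takeWhile_append_of_pos hrepl, htw]
        simp
        omega
      have hdrop : (e :: (List.replicate (c - 1) e ++ canon (Char.ofNat (e.toNat + 1)) cs')).dropWhile
          (fun x => x == e) = canon (Char.ofNat (e.toNat + 1)) cs' := by
        rw [List.dropWhile_cons, if_pos (by simp), List.dropWhile_append_of_pos hrepl, hdw]
      rw [hcanon, solutionAltScan.eq_def]
      cases p with
      | none =>
        simp only [htake, hdrop, beq_self_eq_true, Bool.not_true, Bool.false_or,
          Bool.false_eq_true, if_false]
        rw [ih (Char.ofNat (e.toNat + 1)) (some c) h97' hb']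
        simp [NonInc]
      | some q =>
        simp only [htake, hdrop, beq_self_eq_true, Bool.not_true, Bool.false_or]
        by_cases hq : q < c
        · rw [if_pos (by simpa using hq)]
          simp only [NonInc, Bool.false_eq_true, false_iff]
          rintro ⟨h1, -⟩
          omega
        · rw [if_neg (by simpa using hq)]
          rw [ih (Char.ofNat (e.toNat + 1)) (some c) h97' hb']
          simp only [NonInc]
          constructor
          · intro h; exact ⟨by omega, h⟩
          · intro h; exact h.2

theorem cl_getD (l : List Char) (i : Nat) (hi : i < 26) :
    (cl l).getD i 0 = l.count (Char.ofNat (97 + i)) := by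
  simp [cl, List.getD_eq_getElem?_getD, hi]

theorem canon_perm_filter (l : List Char) :
    (canon 'a' (cl l)).Perm (l.filter (fun c => decide ('a' ≤ c ∧ c ≤ 'z'))) := by
  rw [List.perm_iff_count]
  intro x
  rw [count_canon x (cl l) 'a' (by decide) (by simp [cl])]
  have hlen : (cl l).length = 26 := by simp [cl]
  rw [hlen]
  have ha : ('a' : Char).toNat = 97 := by decide
  have hz : ('z' : Char).toNat = 122 := by decide
  rw [ha]
  by_cases hx : 97 ≤ x.toNat ∧ x.toNat < 97 + 26
  · rw [if_pos hx]
    have hp : (fun c => decide ('a' ≤ c ∧ c ≤ 'z')) x = true := by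
      simp only [decide_eq_true_iff, char_le_iff, char_le_iff, ha, hz]
      omega
    rw [List.count_filter (p := fun c => decide ('a' ≤ c ∧ c ≤ 'z')) hp]
    rw [cl_getD l (x.toNat - 97) (by omega)]
    rw [show 97 + (x.toNat - 97) = x.toNat by omega, Char.ofNat_toNat]
  · rw [if_neg hx]
    symm
    rw [List.count_eq_zero]
    intro hmem
    have := (List.mem_filter.mp hmem).2
    rw [decide_eq_true_iff] at this
    rw [char_le_iff, char_le_iff, ha, hz] at this
    exact hx (by omega)

theorem sorted_filter_eq_canon (l : List Char) :
    PySem.List.sorted (l.filter (fun c => decide ('a' ≤ c ∧ c ≤ 'z'))) (fun x => x) false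
      = canon 'a' (cl l) := by
  apply PySem.List.sorted_id_eq_of_perm_of_pairwise
  · exact canon_perm_filter l
  · exact pairwise_canon (cl l) 'a' (by simp [cl])

theorem B_iff (s : String) : solution_alt s = true ↔ NonInc (cl s.toList) none := by
  unfold solution_alt
  rw [sorted_filter_eq_canon]
  exact scan_canon (cl s.toList) 'a' none (by decide) (by simp [cl])

-- A-side lemmas
theorem values_foldl_insert (f : Char → Int) : ∀ (l : List Char) (d : PySem.Dict Char Int),
    l.Nodup → (∀ k ∈ l, d.contains k = false) →
    (l.foldl (fun d k => d.insert k (f k)) d).values = d.values ++ l.map f := by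
  intro l
  induction l with
  | nil => intro d _ _; simp
  | cons k t ih =>
    intro d hnd hc
    have hck : d.contains k = false := hc k (by simp)
    have hins : (d.insert k (f k)).items = d.items ++ [(k, f k)] :=
      PySem.Dict.items_insert_of_not_contains d (f k) hck
    have hrec := ih (d.insert k (f k)) (List.Nodup.of_cons hnd) ?_
    · rw [List.foldl_cons, hrec]
      simp [PySem.Dict.values, hins]
    · intro k' hk'
      have hne : k' ≠ k := by
        rintro rfl; exact (List.nodup_cons.mp hnd).1 hk'
      rw [PySem.Dict.contains_insert]
      simp [hne, hc k' (by simp [hk'])]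

theorem eq_sorted_rev_iff (v : List Int) :
    (v == PySem.List.sorted v (fun x => x) true) = true ↔
      List.Pairwise (fun a b : Int => b ≤ a) v := by
  simp only [beq_iff_eq]
  constructor
  · intro h
    rw [h]
    exact PySem.List.sorted_pairwise_rev v (fun x => x)
  · intro h
    exact (PySem.List.sorted_rev_eq_self_of_pairwise v (fun x => x) h).symm

theorem A_iff (s : String) : solution s = true ↔
    List.Pairwise (fun a b : Int => b ≤ a)
      [((s.toList.count 'a' : Nat) : Int), (s.toList.count 'b' : Int), (s.toList.count 'c' : Int),
       (s.toList.count 'd' : Int), (s.toList.count 'e' : Int), (s.toList.count 'f' : Int),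
       (s.toList.count 'g' : Int), (s.toList.count 'h' : Int), (s.toList.count 'i' : Int),
       (s.toList.count 'j' : Int), (s.toList.count 'k' : Int), (s.toList.count 'l' : Int),
       (s.toList.count 'm' : Int), (s.toList.count 'n' : Int), (s.toList.count 'o' : Int),
       (s.toList.count 'p' : Int), (s.toList.count 'q' : Int), (s.toList.count 'r' : Int),
       (s.toList.count 's' : Int), (s.toList.count 't' : Int), (s.toList.count 'u' : Int),
       (s.toList.count 'v' : Int), (s.toList.count 'w' : Int), (s.toList.count 'x' : Int),
       (s.toList.count 'y' : Int), (s.toList.count 'z' : Int)] := by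
  unfold solution
  simp only []
  have hstep : (fun (d : PySem.Dict Char Int) letter =>
        if letter ∈ PySem.List.sorted (s.toList) (fun x => x) false
        then d.insert letter (((PySem.List.sorted (s.toList) (fun x => x) false).count letter : Int))
        else d.insert letter 0)
      = (fun (d : PySem.Dict Char Int) letter =>
          d.insert letter (((PySem.List.sorted (s.toList) (fun x => x) false).count letter : Int))) := by
    funext d letter
    by_cases hmem : letter ∈ PySem.List.sorted (s.toList) (fun x => x) false
    · simp [hmem]
    · have : (PySem.List.sorted (s.toList) (fun x => x) false).count letter = 0 :=
        List.count_eq_zero.mpr hmem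
      simp [hmem, this]
  rw [hstep]
  rw [values_foldl_insert _ _ PySem.Dict.empty (by decide) (by intro k _; rfl)]
  simp only [show (PySem.Dict.empty : PySem.Dict Char Int).values = [] from rfl, List.nil_append]
  have hcnt : ∀ C : Char,
      (PySem.List.sorted (s.toList) (fun x => x) false).count C = s.toList.count C :=
    fun C => (PySem.List.sorted_perm (s.toList) (fun x => x) false).count_eq C
  simp only [hcnt]
  rw [show ("abcdefghijklmnopqrstuvwxyz".toList) = ['a','b','c','d','e','f','g','h','i','j','k','l','m','n','o','p','q','r','s','t','u','v','w','x','y','z'] from by decide]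
  simp only [List.map_cons, List.map_nil]
  rw [eq_sorted_rev_iff]

-- ===== VERDICT (by name: the statement is the Claim_ definition above) =====
set_option maxHeartbeats 1000000 in
theorem solution_spec : Claim_equal_solution := by
  intro s _
  unfold Spec_solution
  rw [Bool.eq_iff_iff, A_iff s, B_iff s]
  have hcl : cl s.toList =
      [s.toList.count 'a', s.toList.count 'b', s.toList.count 'c', s.toList.count 'd',
       s.toList.count 'e', s.toList.count 'f', s.toList.count 'g', s.toList.count 'h',
       s.toList.count 'i', s.toList.count 'j', s.toList.count 'k', s.toList.count 'l',
       s.toList.count 'm', s.toList.count 'n', s.toList.count 'o', s.toList.count 'p',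
       s.toList.count 'q', s.toList.count 'r', s.toList.count 's', s.toList.count 't',
       s.toList.count 'u', s.toList.count 'v', s.toList.count 'w', s.toList.count 'x',
       s.toList.count 'y', s.toList.count 'z'] := rfl
  rw [hcl]
  constructor
  · intro h
    have hc := h.isChain
    simp only [List.isChain_cons_cons, List.isChain_singleton, and_true, Nat.cast_le] at hc
    simp only [NonInc, true_and, and_true]
    exact hc
  · intro h
    simp only [NonInc, true_and, and_true] at h
    apply List.IsChain.pairwise
    simp only [List.isChain_cons_cons, List.isChain_singleton, and_true, Nat.cast_le]
    exact h
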